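-- pv_equiv track=rewrite | github.com/HiitsHamza/Algo | Milestone 4/src/pmcover.py | pmcover_half
-- ===== SOURCE A (Python) =====
-- from typing import Dict, List, Set, Tuple
--
-- def pmcover_half(
--     sets: Dict[Tuple[int, int], Set[int]],
--     budgets: Dict[int, int],
--     k: int
-- ) -> List[Tuple[int, int]]:
--     """
--     Greedy 1/2‐approximation for the partition‐matroid coverage instance.
--
--     :param sets: mapping from keys (a, c) to the set of terminals covered by c
--     :param budgets: mapping from each a to its maximum allowed selections (B*)
--     :param k: number of terminals we still need to cover (k_rem)
--     :return: list of selected keys (a, c)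
--     """
--     covered: Set[int] = set()
--     selected: List[Tuple[int, int]] = []
--     used: Dict[int, int] = {a: 0 for a in budgets}
--
--     while len(covered) < k:
--         best_key = None
--         best_gain = 0
--
--         # Find the key with maximum marginal gain that respects budgets
--         for key, items in sets.items():
--             a, _ = key
--             if used.get(a, 0) >= budgets.get(a, 0):
--                 continue
--             # marginal gain = uncovered items this key would cover
--             gain = len(items - covered)
--             if gain > best_gain:
--                 best_gain = gain
--                 best_key = key
--
--         # stop if no positive gain
--         if best_key is None or best_gain == 0:
--             break
--
--         # select it
--         selected.append(best_key)
--         a, _ = best_key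
--         used[a] = used.get(a, 0) + 1
--         covered |= sets[best_key]
--
--     return selected
-- ===== SOURCE B (Python) =====
-- from typing import Dict, List, Set, Tuple
--
-- def pmcover_half(
--     sets: Dict[Tuple[int, int], Set[int]],
--     budgets: Dict[int, int],
--     k: int
-- ) -> List[Tuple[int, int]]:
--     # Inverted-index variant: build once an element -> keys index and keep every
--     # key's marginal gain as an integer counter; when an element becomes covered,
--     # decrement the counters of exactly the keys containing it (each element/key
--     # incidence is touched once overall), so no set difference is ever recomputed.
--     gain: Dict[Tuple[int, int], int] = {key: len(items) for key, items in sets.items()}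
--     incidences = [(e, key) for key, items in sets.items() for e in items]
--     index: Dict[int, List[Tuple[int, int]]] = {}
--     for e, key in incidences:
--         index.setdefault(e, []).append(key)
--     used: Dict[int, int] = {a: 0 for a in budgets}
--     covered: Set[int] = set()
--     selected: List[Tuple[int, int]] = []
--
--     while len(covered) < k:
--         best_key = None
--         best_gain = 0
--         for key, g in gain.items():
--             if used.get(key[0], 0) >= budgets.get(key[0], 0):
--                 continue
--             if g > best_gain:
--                 best_gain = g
--                 best_key = key
--         if best_key is None or best_gain == 0:
--             break
--         selected.append(best_key)
--         used[best_key[0]] = used.get(best_key[0], 0) + 1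
--         for e in sets[best_key]:
--             if e not in covered:
--                 covered.add(e)
--                 for key2 in index[e]:
--                     gain[key2] -= 1
--
--     return selected
-- ===== Notes on version B (the rewrite author's own statement) =====
-- stated objective: alternative
-- what changed: B builds an element-to-keys inverted index once and keeps each key's marginal gain as an integer counter, decremented through the index exactly when an element first becomes covered, so each round is a plain max-scan over counters instead of A's recomputation of every set difference |items - covered| per round.
import Mathlib
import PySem

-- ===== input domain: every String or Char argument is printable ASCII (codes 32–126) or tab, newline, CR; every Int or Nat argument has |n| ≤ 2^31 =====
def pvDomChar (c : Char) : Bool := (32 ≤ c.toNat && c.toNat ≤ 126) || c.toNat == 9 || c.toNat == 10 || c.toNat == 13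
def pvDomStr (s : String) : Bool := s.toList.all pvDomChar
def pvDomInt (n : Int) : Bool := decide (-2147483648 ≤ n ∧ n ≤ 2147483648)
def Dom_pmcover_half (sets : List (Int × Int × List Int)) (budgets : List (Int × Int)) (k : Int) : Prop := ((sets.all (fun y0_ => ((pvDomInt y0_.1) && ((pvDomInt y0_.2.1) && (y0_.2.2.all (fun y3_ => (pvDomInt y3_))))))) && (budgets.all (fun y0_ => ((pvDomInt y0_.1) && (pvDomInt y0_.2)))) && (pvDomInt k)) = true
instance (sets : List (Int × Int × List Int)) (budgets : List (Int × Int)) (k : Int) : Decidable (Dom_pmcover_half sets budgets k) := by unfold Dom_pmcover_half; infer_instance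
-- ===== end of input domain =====

-- B builds an element→keys inverted index once and maintains each key's marginal gain as an
-- integer counter decremented through the index as elements become covered, instead of A's
-- per-round recomputation of every set difference (objective: alternative).

-- ===== PORT A =====
-- inner for-loop of A: scan sets.items() for the budget-feasible key of maximum
-- marginal gain, where the gain is recomputed as len(items - covered)
def pmAbest (used budgets : PySem.Dict Int Int) (covered : PySem.Set Int)
    (entries : List ((Int × Int) × List Int)) : Option (Int × Int) × Int :=
  entries.foldl (fun st p =>
    if used.getD p.1.1 0 ≥ budgets.getD p.1.1 0 then st
    else
      let gain : Int := ((PySem.Set.diff p.2 covered).length : Int)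
      if gain > st.2 then (some p.1, gain) else st) (none, 0)

-- A's while loop. Fuel k.toNat + 1 is exact: an iteration recurses only when
-- len(covered) < k and with best_gain > 0, which strictly grows covered, so the
-- Python loop performs at most k iterations.  sets[best_key] is ported as getD
-- with default [] — the scanned key is always present, so the default is unreachable.
def pmAloop (m : PySem.Dict (Int × Int) (List Int)) (budgets : PySem.Dict Int Int) (k : Int) :
    Nat → PySem.Set Int → List (Int × Int) → PySem.Dict Int Int → List (Int × Int)
  | 0, _, selected, _ => selected
  | fuel + 1, covered, selected, used =>
    if (covered.length : Int) < k then
      let best := pmAbest used budgets covered m.items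
      match best.1 with
      | none => selected
      | some key =>
        if best.2 = 0 then selected
        else
          pmAloop m budgets k fuel
            (PySem.Set.union covered (m.getD key []))
            (selected ++ [key])
            (used.insert key.1 (used.getD key.1 0 + 1))
    else selected

def pmcover_half (sets : List (Int × Int × List Int)) (budgets : List (Int × Int)) (k : Int) : List (Int × Int) :=
  let m : PySem.Dict (Int × Int) (List Int) := PySem.Dict.mk (sets.map (fun e => ((e.1, e.2.1), e.2.2)))
  let bud : PySem.Dict Int Int := PySem.Dict.mk budgets
  let used : PySem.Dict Int Int := PySem.Dict.mk (budgets.map (fun p => (p.1, (0 : Int))))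
  pmAloop m bud k (k.toNat + 1) [] [] used

-- ===== PORT B =====
-- inner for-loop of B: same scan order, but a key's gain is the stored counter
def pmBbest (used budgets : PySem.Dict Int Int)
    (entries : List ((Int × Int) × Int)) : Option (Int × Int) × Int :=
  entries.foldl (fun st p =>
    if used.getD p.1.1 0 ≥ budgets.getD p.1.1 0 then st
    else if p.2 > st.2 then (some p.1, p.2) else st) (none, 0)

-- the grouping pass over the incidence list: index.setdefault(e, []).append(key)
-- is exactly Dict.modify e [] (· ++ [key])
def pmIndex (incidences : List (Int × (Int × Int))) : PySem.Dict Int (List (Int × Int)) :=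
  incidences.foldl (fun d q => d.modify q.1 [] (· ++ [q.2])) PySem.Dict.empty

-- B's inner cover loop over sets[best_key]: newly covered elements are added to covered
-- and the gain counters of the keys listed in index[e] are decremented.
-- index[e] and gain[key2] are ported as getD ([] / 0) — e has an index entry (it occurs
-- in some set) and key2 is always a key of gain, so the defaults are unreachable.
def pmBcover (index : PySem.Dict Int (List (Int × Int)))
    (elems : List Int) (st : PySem.Set Int × PySem.Dict (Int × Int) Int) :
    PySem.Set Int × PySem.Dict (Int × Int) Int :=
  elems.foldl (fun st e =>
    if PySem.Set.contains st.1 e then st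
    else (PySem.Set.add st.1 e,
          (index.getD e []).foldl (fun g k2 => g.modify k2 0 (· - 1)) st.2)) st

-- B's while loop; same fuel argument as A's port (covered grows each selecting round).
def pmBloop (m : PySem.Dict (Int × Int) (List Int)) (index : PySem.Dict Int (List (Int × Int)))
    (budgets : PySem.Dict Int Int) (k : Int) :
    Nat → PySem.Set Int → PySem.Dict (Int × Int) Int → List (Int × Int) → PySem.Dict Int Int → List (Int × Int)
  | 0, _, _, selected, _ => selected
  | fuel + 1, covered, gain, selected, used =>
    if (covered.length : Int) < k then
      let best := pmBbest used budgets gain.items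
      match best.1 with
      | none => selected
      | some key =>
        if best.2 = 0 then selected
        else
          let st := pmBcover index (m.getD key []) (covered, gain)
          pmBloop m index budgets k fuel st.1 st.2
            (selected ++ [key])
            (used.insert key.1 (used.getD key.1 0 + 1))
    else selected

def pmcover_half_alt (sets : List (Int × Int × List Int)) (budgets : List (Int × Int)) (k : Int) : List (Int × Int) :=
  let m : PySem.Dict (Int × Int) (List Int) := PySem.Dict.mk (sets.map (fun e => ((e.1, e.2.1), e.2.2)))
  let gain : PySem.Dict (Int × Int) Int := PySem.Dict.mk (sets.map (fun e => ((e.1, e.2.1), (e.2.2.length : Int))))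
  let incidences : List (Int × (Int × Int)) := m.items.flatMap (fun p => p.2.map (fun e => (e, p.1)))
  let index := pmIndex incidences
  let bud : PySem.Dict Int Int := PySem.Dict.mk budgets
  let used : PySem.Dict Int Int := PySem.Dict.mk (budgets.map (fun p => (p.1, (0 : Int))))
  pmBloop m index bud k (k.toNat + 1) [] gain [] used

-- ===== PRECONDITION & SPEC =====
-- Pre_ only requires that the list arguments really represent A's Python arguments
-- (a dict keyed by (a, c) with set values, and a dict keyed by a): pairwise-distinct
-- dict keys and duplicate-free set elements; such duplicates are unrepresentable as
-- Python inputs of A, so no input on which A returns is excluded.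
def Pre_pmcover_half (sets : List (Int × Int × List Int)) (budgets : List (Int × Int)) (k : Int) : Prop :=
  (sets.map (fun e => (e.1, e.2.1))).Nodup ∧ (budgets.map Prod.fst).Nodup ∧ ∀ e ∈ sets, e.2.2.Nodup
instance (sets : List (Int × Int × List Int)) (budgets : List (Int × Int)) (k : Int) : Decidable (Pre_pmcover_half sets budgets k) := by unfold Pre_pmcover_half; infer_instance

def pvWitness_pmcover_half : (List (Int × Int × List Int)) × (List (Int × Int)) × Int :=
  ([(1, 2, [1, 2]), (1, 3, [2, 3])], [(1, 1)], 2)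

def Spec_pmcover_half (sets : List (Int × Int × List Int)) (budgets : List (Int × Int)) (k : Int) (out : List (Int × Int)) : Prop := out = pmcover_half_alt sets budgets k
instance (sets : List (Int × Int × List Int)) (budgets : List (Int × Int)) (k : Int) (out : List (Int × Int)) : Decidable (Spec_pmcover_half sets budgets k out) := by unfold Spec_pmcover_half; infer_instance

-- ===== CLAIM (what is proved, stated in full; the proofs are below) =====
def Claim_equal_pmcover_half : Prop := ∀ (sets : List (Int × Int × List Int)) (budgets : List (Int × Int)) (k : Int), Dom_pmcover_half sets budgets k → Pre_pmcover_half sets budgets k → Spec_pmcover_half sets budgets k (pmcover_half sets budgets k)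

-- ===== LEMMAS AND PROOFS =====

-- dict lookup commutes with mapping the values of the backing list
theorem pm_get?_mk_map {β : Type} (l : List ((Int × Int) × List Int)) (g : List Int → β) (key : Int × Int) :
    (PySem.Dict.mk (l.map (fun p => (p.1, g p.2)))).get? key
      = ((PySem.Dict.mk l).get? key).map g := by
  simp only [PySem.Dict.get?, List.find?_map]
  have : (fun p : (Int × Int) × β => p.1 == key) ∘ (fun p : (Int × Int) × List Int => (p.1, g p.2))
      = fun p : (Int × Int) × List Int => p.1 == key := rfl
  rw [this]
  cases List.find? (fun p : (Int × Int) × List Int => p.1 == key) l <;> simp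

-- a value looked up in m is one of m's item values, hence duplicate-free under Pre_
theorem pm_getD_nodup (m : PySem.Dict (Int × Int) (List Int))
    (hvals : ∀ p ∈ m.items, p.2.Nodup) (key : Int × Int) : (m.getD key []).Nodup := by
  cases hq : m.get? key with
  | none => simp [PySem.Dict.getD, hq]
  | some v =>
    have : (key, v) ∈ m.items := by
      simp only [PySem.Dict.get?] at hq
      cases hf : List.find? (fun p => p.1 == key) m.items with
      | none => simp [hf] at hq
      | some p =>
        simp only [hf, Option.map_some] at hq
        have hp := List.find?_some hf
        have hmem := List.mem_of_find?_eq_some hf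
        have : p = (key, v) := by
          cases p with
          | mk p1 p2 => simp at hp hq; simp [hp, hq]
        exact this ▸ hmem
    have := hvals _ this
    simpa [PySem.Dict.getD, hq] using this

-- decrement loop: final counter = old counter minus the key's multiplicity in the list
theorem pm_getD_foldl_modify_sub (l : List (Int × Int)) (d : PySem.Dict (Int × Int) Int) (v : Int × Int) :
    (l.foldl (fun g k2 => g.modify k2 0 (· - 1)) d).getD v 0 = d.getD v 0 - (l.count v : Int) := by
  induction l generalizing d with
  | nil => simp
  | cons x l ih =>
    rw [List.foldl_cons, ih, PySem.Dict.getD_modify]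
    by_cases hv : v = x
    · subst hv; simp; ring
    · simp [hv, Ne.symm hv]

-- the decrement loop touches only existing keys, so the key list is unchanged
theorem pm_keys_foldl_modify_sub (l : List (Int × Int)) (d : PySem.Dict (Int × Int) Int)
    (h : ∀ x ∈ l, x ∈ d.keys) :
    (l.foldl (fun g k2 => g.modify k2 0 (· - 1)) d).keys = d.keys := by
  induction l generalizing d with
  | nil => rfl
  | cons x l ih =>
    rw [List.foldl_cons]
    have hx : (d.modify x 0 (· - 1)).keys = d.keys := by
      rw [PySem.Dict.keys_modify, PySem.Dict.keys_insert_of_contains]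
      exact (PySem.Dict.contains_iff_mem_keys d x).mpr (h x (by simp))
    rw [ih _ (by intro y hy; rw [hx]; exact h y (List.mem_cons_of_mem _ hy)), hx]

-- the grouping pass: index[e] is the sub-list of incidences at e, keys only
theorem pm_index_getD (flat : List (Int × (Int × Int))) (e : Int) :
    (pmIndex flat).getD e [] = (flat.filter (fun q => q.1 == e)).map (·.2) := by
  unfold pmIndex
  rw [PySem.Dict.getD_foldl_modify_append]
  simp

-- the members of index[e] are keys of L
theorem pm_index_mem (L : List ((Int × Int) × List Int)) (e : Int) (key' : Int × Int)
    (h : key' ∈ ((L.flatMap (fun p => p.2.map (fun x => (x, p.1)))).filter (fun q => q.1 == e)).map (·.2)) :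
    key' ∈ L.map Prod.fst := by
  simp only [List.mem_map, List.mem_filter, List.mem_flatMap] at h ⊢
  obtain ⟨q, ⟨⟨p, hp, hq⟩, -⟩, rfl⟩ := h
  obtain ⟨x, -, rfl⟩ := hq
  exact ⟨p, hp, rfl⟩

theorem pm_count_map_const (l : List Int) (b a : Int × Int) :
    (l.map (fun _ => b)).count a = if a = b then l.length else 0 := by
  rw [List.map_const', List.count_replicate]
  by_cases h : a = b
  · simp [h]
  · simp [beq_iff_eq, h, Ne.symm h]

-- key' occurs in index[e] exactly once when e ∈ sets[key'], else not at all
theorem pm_index_count (L : List ((Int × Int) × List Int))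
    (hkeys : (L.map Prod.fst).Nodup) (hvals : ∀ p ∈ L, p.2.Nodup) (e : Int) (key' : Int × Int) :
    (((L.flatMap (fun p => p.2.map (fun x => (x, p.1)))).filter (fun q => q.1 == e)).map (·.2)).count key'
      = (if e ∈ ((PySem.Dict.mk L).getD key' []) then 1 else 0) := by
  induction L with
  | nil => simp [PySem.Dict.getD, PySem.Dict.get?]
  | cons p L ih =>
    obtain ⟨pk, pv⟩ := p
    rcases List.nodup_cons.mp hkeys with ⟨hp, hL⟩
    have hvp : pv.Nodup := hvals (pk, pv) (by simp)
    rw [List.flatMap_cons, List.filter_append, List.map_append, List.count_append]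
    have hgd : (PySem.Dict.mk ((pk, pv) :: L)).getD key' []
        = if pk = key' then pv else (PySem.Dict.mk L).getD key' [] := by
      simp only [PySem.Dict.getD, PySem.Dict.get?_mk_cons, beq_iff_eq]
      by_cases h : pk = key' <;> simp [h]
    have hhead : (((pv.map (fun x => (x, pk))).filter (fun q => q.1 == e)).map (·.2)).count key'
        = if pk = key' ∧ e ∈ pv then 1 else 0 := by
      rw [List.filter_map, List.map_map]
      rw [show ((fun q : Int × (Int × Int) => q.1 == e) ∘ fun x => (x, pk)) = (fun x : Int => x == e) from rfl]
      rw [show ((fun q : Int × (Int × Int) => q.2) ∘ fun x => (x, pk)) = (fun _ : Int => pk) from rfl]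
      rw [pm_count_map_const]
      have hflen : (pv.filter (fun x : Int => x == e)).length = if e ∈ pv then 1 else 0 := by
        by_cases he : e ∈ pv
        · simpa [List.count, List.countP_eq_length_filter, he] using
            List.count_eq_one_of_mem hvp he
        · simpa [List.count, List.countP_eq_length_filter, he] using
            List.count_eq_zero_of_not_mem (l := pv) (a := e) he
      by_cases hk : key' = pk
      · subst hk; simp [hflen]
      · simp only [if_neg hk]
        rw [if_neg (fun h : pk = key' ∧ e ∈ pv => hk h.1.symm)]
    rw [hhead, ih hL (fun q hq => hvals q (by simp [hq])), hgd]
    by_cases hk : pk = key'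
    · subst hk
      have hnot : (PySem.Dict.mk L).getD pk [] = [] := by
        simp only [PySem.Dict.getD]
        cases hf : (PySem.Dict.mk L).get? pk with
        | none => rfl
        | some v =>
          exfalso
          simp only [PySem.Dict.get?] at hf
          cases hff : List.find? (fun q => q.1 == pk) L with
          | none => simp [hff] at hf
          | some q =>
            have := List.mem_of_find?_eq_some hff
            have heq := List.find?_some hff
            exact hp (List.mem_map.mpr ⟨q, this, by simpa [beq_iff_eq] using heq⟩)
      simp [hnot]
    · simp [hk]

-- adding a new element to covered lowers a set's residual size by 1 iff it contains it
theorem pm_diff_length_add (S c : List Int) (e : Int) (hS : S.Nodup) (he : e ∉ c) :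
    ((PySem.Set.diff S (c ++ [e])).length : Int)
      = ((PySem.Set.diff S c).length : Int) - (if e ∈ S then 1 else 0) := by
  have h1 : PySem.Set.diff S (c ++ [e]) = (PySem.Set.diff S c).filter (fun x => !(decide (x = e))) := by
    simp only [PySem.Set.diff, PySem.Set.contains, List.filter_filter]
    apply List.filter_congr
    intro x _
    by_cases hx : x = e <;> by_cases hc : x ∈ c <;> simp [hx, hc]
  have hnd : (PySem.Set.diff S c).Nodup := List.Nodup.filter _ hS
  have hsplit := List.length_eq_length_filter_add (l := PySem.Set.diff S c) (fun x => decide (x = e))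
  have hcnt : ((PySem.Set.diff S c).filter (fun x => decide (x = e))).length
      = if e ∈ S then 1 else 0 := by
    have hmem : e ∈ PySem.Set.diff S c ↔ e ∈ S := by
      simp [PySem.Set.diff, PySem.Set.contains, he]
    by_cases heS : e ∈ S
    · have : (PySem.Set.diff S c).count e = 1 :=
        List.count_eq_one_of_mem hnd (hmem.mpr heS)
      simpa [List.count, List.countP_eq_length_filter, heS, beq_iff_eq] using this
    · have : (PySem.Set.diff S c).count e = 0 :=
        List.count_eq_zero_of_not_mem (fun h => heS (hmem.mp h))
      simpa [List.count, List.countP_eq_length_filter, heS, beq_iff_eq] using this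
  rw [h1, hsplit, hcnt]
  by_cases heS : e ∈ S <;> simp [heS]

-- B's cover loop: covered becomes covered ∪ S and every counter tracks the new residual size
theorem pm_cover_spec (m : PySem.Dict (Int × Int) (List Int))
    (hkeys : m.keys.Nodup) (hvals : ∀ p ∈ m.items, p.2.Nodup)
    (index : PySem.Dict Int (List (Int × Int)))
    (hidx : index = pmIndex (m.items.flatMap (fun p => p.2.map (fun e => (e, p.1)))))
    (S : List Int) :
    ∀ (covered : PySem.Set Int) (gain : PySem.Dict (Int × Int) Int),
      gain.keys = m.keys →
      (∀ key', gain.getD key' 0 = ((PySem.Set.diff (m.getD key' []) covered).length : Int)) →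
      (pmBcover index S (covered, gain)).1 = PySem.Set.union covered S ∧
      (pmBcover index S (covered, gain)).2.keys = m.keys ∧
      (∀ key', (pmBcover index S (covered, gain)).2.getD key' 0
        = ((PySem.Set.diff (m.getD key' []) (PySem.Set.union covered S)).length : Int)) := by
  induction S with
  | nil =>
    intro covered gain hgk hg
    exact ⟨rfl, hgk, fun key' => hg key'⟩
  | cons e S ih =>
    intro covered gain hgk hg
    have hcons : pmBcover index (e :: S) (covered, gain)
        = pmBcover index S (if PySem.Set.contains covered e then (covered, gain)
            else (PySem.Set.add covered e,
              (index.getD e []).foldl (fun g k2 => g.modify k2 0 (· - 1)) gain)) := rfl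
    by_cases hc : PySem.Set.contains covered e
    · have hmem : e ∈ covered := by simpa [PySem.Set.contains] using hc
      have hadd : PySem.Set.add covered e = covered := by
        simp [PySem.Set.add, PySem.Set.contains, hmem]
      have hun : PySem.Set.union covered (e :: S) = PySem.Set.union covered S := by
        simp [PySem.Set.union, PySem.Set.update, hadd]
      rw [hcons, if_pos hc, hun]
      exact ih covered gain hgk hg
    · have he : e ∉ covered := by simpa [PySem.Set.contains] using hc
      have hadd : PySem.Set.add covered e = covered ++ [e] := by
        simp [PySem.Set.add, PySem.Set.contains, he]
      have hun : PySem.Set.union covered (e :: S) = PySem.Set.union (covered ++ [e]) S := by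
        simp [PySem.Set.union, PySem.Set.update, hadd]
      set gain' := (index.getD e []).foldl (fun g k2 => g.modify k2 0 (· - 1)) gain with hgain'
      have hK : index.getD e [] = ((m.items.flatMap (fun p => p.2.map (fun x => (x, p.1)))).filter (fun q => q.1 == e)).map (·.2) := by
        rw [hidx, pm_index_getD]
      have hkeys' : (m.items.map Prod.fst).Nodup := hkeys
      have hmk : PySem.Dict.mk m.items = m := rfl
      have hgk' : gain'.keys = m.keys := by
        rw [hgain', pm_keys_foldl_modify_sub]
        · exact hgk
        · intro x hx
          rw [hgk]
          rw [hK] at hx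
          exact pm_index_mem _ _ _ hx
      have hg' : ∀ key', gain'.getD key' 0
          = ((PySem.Set.diff (m.getD key' []) (covered ++ [e])).length : Int) := by
        intro key'
        rw [hgain', pm_getD_foldl_modify_sub, hg key', hK]
        rw [pm_index_count m.items hkeys' hvals e key', hmk]
        rw [pm_diff_length_add _ _ _ (pm_getD_nodup m hvals key') he]
        by_cases hem : e ∈ m.getD key' [] <;> simp [hem]
      rw [hcons, if_neg hc, hadd, hun]
      exact ih (covered ++ [e]) gain' hgk' hg'

theorem pm_best_go (used budgets : PySem.Dict Int Int) (covered : PySem.Set Int)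
    (val : (Int × Int) → List Int) (gv : (Int × Int) → Int)
    (hg : ∀ key, gv key = ((PySem.Set.diff (val key) covered).length : Int)) :
    ∀ (keys : List (Int × Int)) (st : Option (Int × Int) × Int),
      (keys.map (fun key => (key, gv key))).foldl (fun st p =>
        if used.getD p.1.1 0 ≥ budgets.getD p.1.1 0 then st
        else if p.2 > st.2 then (some p.1, p.2) else st) st
      = (keys.map (fun key => (key, val key))).foldl (fun st p =>
        if used.getD p.1.1 0 ≥ budgets.getD p.1.1 0 then st
        else
          let gain : Int := ((PySem.Set.diff p.2 covered).length : Int)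
          if gain > st.2 then (some p.1, gain) else st) st := by
  intro keys
  induction keys with
  | nil => intro st; rfl
  | cons kk keys ih =>
    intro st
    simp only [List.map_cons, List.foldl_cons]
    rw [show (if used.getD kk.1 0 ≥ budgets.getD kk.1 0 then st
        else if gv kk > st.2 then (some kk, gv kk) else st)
      = (if used.getD kk.1 0 ≥ budgets.getD kk.1 0 then st
        else if ((PySem.Set.diff (val kk) covered).length : Int) > st.2
             then (some kk, ((PySem.Set.diff (val kk) covered).length : Int)) else st) from by rw [hg kk]]
    exact ih _

-- B's scan over the counters is A's scan with the gains written out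
theorem pm_best_eq (m : PySem.Dict (Int × Int) (List Int)) (hkeys : m.keys.Nodup)
    (used budgets : PySem.Dict Int Int) (covered : PySem.Set Int)
    (gain : PySem.Dict (Int × Int) Int) (hgk : gain.keys = m.keys)
    (hg : ∀ key', gain.getD key' 0 = ((PySem.Set.diff (m.getD key' []) covered).length : Int)) :
    pmBbest used budgets gain.items = pmAbest used budgets covered m.items := by
  have hgi : gain.items = m.keys.map (fun key => (key, gain.getD key 0)) := by
    rw [PySem.Dict.items_eq_map_keys gain (hgk ▸ hkeys) 0, hgk]
  have hmi : m.items = m.keys.map (fun key => (key, m.getD key [])) :=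
    PySem.Dict.items_eq_map_keys m hkeys []
  rw [pmBbest, pmAbest, hgi, hmi]
  exact pm_best_go used budgets covered _ _ hg m.keys (none, 0)

-- loop invariant: B's counters are the residual sizes of A's sets minus covered
theorem pm_loop_eq (m : PySem.Dict (Int × Int) (List Int)) (budgets : PySem.Dict Int Int) (k : Int)
    (hkeys : m.keys.Nodup) (hvals : ∀ p ∈ m.items, p.2.Nodup)
    (index : PySem.Dict Int (List (Int × Int)))
    (hidx : index = pmIndex (m.items.flatMap (fun p => p.2.map (fun e => (e, p.1))))) :
    ∀ (fuel : Nat) (covered : PySem.Set Int) (gain : PySem.Dict (Int × Int) Int)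
      (selected : List (Int × Int)) (used : PySem.Dict Int Int),
      gain.keys = m.keys →
      (∀ key', gain.getD key' 0 = ((PySem.Set.diff (m.getD key' []) covered).length : Int)) →
      pmAloop m budgets k fuel covered selected used
        = pmBloop m index budgets k fuel covered gain selected used := by
  intro fuel
  induction fuel with
  | zero => intro covered gain selected used _ _; rfl
  | succ fuel ih =>
    intro covered gain selected used hgk hg
    show (if (covered.length : Int) < k then _ else selected)
        = (if (covered.length : Int) < k then _ else selected)
    by_cases hk : (covered.length : Int) < k
    · simp only [if_pos hk]
      rw [pm_best_eq m hkeys used budgets covered gain hgk hg]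
      cases hb : (pmAbest used budgets covered m.items).1 with
      | none => rfl
      | some key =>
        by_cases hbg : (pmAbest used budgets covered m.items).2 = 0
        · simp [hbg]
        · simp only [if_neg hbg]
          obtain ⟨hcov, hgk', hg'⟩ := pm_cover_spec m hkeys hvals index hidx
            (m.getD key []) covered gain hgk hg
          rw [ih (PySem.Set.union covered (m.getD key [])) _ (selected ++ [key])
              (used.insert key.1 (used.getD key.1 0 + 1)) hgk' (hcov ▸ hg'), hcov]
    · simp [hk]

-- ===== VERDICT (by name: the statement is the Claim_ definition above) =====
theorem pmcover_half_spec : Claim_equal_pmcover_half := by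
  intro sets budgets k _ hpre
  unfold Spec_pmcover_half pmcover_half pmcover_half_alt
  set m : PySem.Dict (Int × Int) (List Int) := PySem.Dict.mk (sets.map (fun e => ((e.1, e.2.1), e.2.2))) with hm
  have hkeys : m.keys.Nodup := by
    show ((sets.map (fun e => ((e.1, e.2.1), e.2.2))).map (·.1)).Nodup
    simpa [List.map_map, Function.comp] using hpre.1
  have hvals : ∀ p ∈ m.items, p.2.Nodup := by
    intro p hp
    rcases List.mem_map.mp hp with ⟨e, he, rfl⟩
    exact hpre.2.2 e he
  have hgain : PySem.Dict.mk (sets.map (fun e => ((e.1, e.2.1), (e.2.2.length : Int))))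
      = PySem.Dict.mk ((sets.map (fun e => ((e.1, e.2.1), e.2.2))).map (fun p => (p.1, (p.2.length : Int)))) := by
    rw [List.map_map]
    rfl
  have hgk : (PySem.Dict.mk (sets.map (fun e => ((e.1, e.2.1), (e.2.2.length : Int))))).keys = m.keys := by
    show (sets.map (fun e => ((e.1, e.2.1), (e.2.2.length : Int)))).map (·.1)
        = (sets.map (fun e => ((e.1, e.2.1), e.2.2))).map (·.1)
    simp [List.map_map, Function.comp]
  have hg : ∀ key', (PySem.Dict.mk (sets.map (fun e => ((e.1, e.2.1), (e.2.2.length : Int))))).getD key' 0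
      = ((PySem.Set.diff (m.getD key' []) []).length : Int) := by
    intro key'
    have hdiff : PySem.Set.diff (m.getD key' []) [] = m.getD key' [] := by
      simp [PySem.Set.diff, PySem.Set.contains]
    rw [hdiff, hgain]
    simp only [PySem.Dict.getD, hm]
    rw [pm_get?_mk_map (sets.map (fun e => ((e.1, e.2.1), e.2.2))) (fun v => (v.length : Int)) key']
    cases hq : (PySem.Dict.mk (sets.map (fun e => ((e.1, e.2.1), e.2.2)))).get? key' with
    | none => simp
    | some v => simp
  exact pm_loop_eq m (PySem.Dict.mk budgets) k hkeys hvals _ rfl (k.toNat + 1) [] _ [] _ hgk hg
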